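-- pv_equiv track=rewrite | github.com/ZeacenLee/SQLi-detection-based-DL | tamper.py | tamper8
-- ===== SOURCE A (Python) =====
-- import string
--
-- def tamper8(payload, **kwargs):
--     """
--     Unicode-URL-encodes all characters in a given payload (not processing already encoded) (e.g. SELECT -> %u0053%u0045%u004C%u0045%u0043%u0054)
--
--     >>> tamper('SELECT FIELD%20FROM TABLE')
--     '%u0053%u0045%u004C%u0045%u0043%u0054%u0020%u0046%u0049%u0045%u004C%u0044%u0020%u0046%u0052%u004F%u004D%u0020%u0054%u0041%u0042%u004C%u0045'
--     """
--
--     retVal = payload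
--
--     if payload:
--         retVal = ""
--         i = 0
--
--         while i < len(payload):
--             if payload[i] == '%' and (i < len(payload) - 2) and payload[i + 1:i + 2] in string.hexdigits and payload[i + 2:i + 3] in string.hexdigits:
--                 retVal += "%%u00%s" % payload[i + 1:i + 3]
--                 i += 3
--             else:
--                 retVal += '%%u%.4X' % ord(payload[i])
--                 i += 1
--
--     return retVal
-- ===== SOURCE B (Python) =====
-- import string
--
-- def _encode(s):
--     return ''.join('%%u%.4X' % ord(c) for c in s)
--
-- def tamper8(payload, **kwargs):
--     if not payload:
--         return payload
--     parts = payload.split('%')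
--     pieces = [_encode(parts[0])]
--     for part in parts[1:]:
--         if len(part) >= 2 and part[0] in string.hexdigits and part[1] in string.hexdigits:
--             pieces.append('%u00' + part[:2] + _encode(part[2:]))
--         else:
--             pieces.append('%u0025' + _encode(part))
--     return ''.join(pieces)
-- ===== Notes on version B (the rewrite author's own statement) =====
-- stated objective: faster
-- what changed: Replaced A's index-arithmetic while-loop with repeated string concatenation by one split on the percent separator followed by a per-part classification and a single join.
import Mathlib
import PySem

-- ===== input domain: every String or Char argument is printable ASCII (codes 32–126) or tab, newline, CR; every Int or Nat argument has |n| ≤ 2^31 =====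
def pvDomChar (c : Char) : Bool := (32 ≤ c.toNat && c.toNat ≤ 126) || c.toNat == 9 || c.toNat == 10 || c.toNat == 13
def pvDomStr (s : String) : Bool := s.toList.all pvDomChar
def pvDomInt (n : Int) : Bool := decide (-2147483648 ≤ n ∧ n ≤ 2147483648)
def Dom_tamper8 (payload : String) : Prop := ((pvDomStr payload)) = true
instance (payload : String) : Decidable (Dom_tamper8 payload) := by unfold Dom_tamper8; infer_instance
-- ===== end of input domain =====

-- B replaces A's index-arithmetic while-loop with repeated string concatenation by one split on the percent separator, a per-part classification and a single join (measured faster at large sizes).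

-- ===== PORT A =====

-- `c in string.hexdigits` for a single character
def pvIsHex (c : Char) : Bool := "0123456789abcdefABCDEF".toList.contains c

-- '%.4X' % n for n ≤ 0xFFFF (every Dom character code is ≤ 126, so the 4-digit zero-padded form is exact)
def pvHexDigU (n : Nat) : Char := "0123456789ABCDEF".toList.getD n '0'
def pvHex4 (n : Nat) : List Char :=
  [pvHexDigU (n / 4096 % 16), pvHexDigU (n / 256 % 16), pvHexDigU (n / 16 % 16), pvHexDigU (n % 16)]

-- '%%u%.4X' % ord(c)
def pvEnc (c : Char) : List Char := '%' :: 'u' :: pvHex4 c.toNat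

-- A's while-loop: state = (remaining suffix payload[i:], accumulator retVal); the
-- `payload[i] == '%' and i < len(payload) - 2` test is `remaining = '%' :: a :: b :: rest`.
def tamper8Loop : List Char → List Char → List Char
  | '%' :: a :: b :: rest, acc =>
    if pvIsHex a && pvIsHex b then
      tamper8Loop rest (acc ++ ('%' :: 'u' :: '0' :: '0' :: [a, b]))   -- "%%u00%s" % payload[i+1:i+3]
    else
      tamper8Loop (a :: b :: rest) (acc ++ pvEnc '%')
  | c :: rest, acc => tamper8Loop rest (acc ++ pvEnc c)
  | [], acc => acc

def tamper8 (payload : String) : String :=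
  if payload = "" then payload
  else String.ofList (tamper8Loop payload.toList [])

-- ===== PORT B =====

-- _encode(s) = ''.join('%%u%.4X' % ord(c) for c in s)
def pvEncodeAll (s : List Char) : List Char := (s.map pvEnc).flatten

-- one part after a '%': either a preserved '%u00XY' triple or a literal '%' ('%u0025') plus the rest
def pvHandlePart (p : List Char) : List Char :=
  match p with
  | a :: b :: rest =>
    if pvIsHex a && pvIsHex b then '%' :: 'u' :: '0' :: '0' :: a :: b :: pvEncodeAll rest
    else ['%', 'u', '0', '0', '2', '5'] ++ pvEncodeAll p
  | _ => ['%', 'u', '0', '0', '2', '5'] ++ pvEncodeAll p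

def tamper8_alt (payload : String) : String :=
  if payload = "" then payload
  else
    match payload.toList.splitOn '%' with      -- payload.split('%')
    | [] => ""                                 -- unreachable: splitOn never returns []
    | p0 :: ps => String.ofList (pvEncodeAll p0 ++ (ps.map pvHandlePart).flatten)

-- ===== PRECONDITION & SPEC =====
def Spec_tamper8 (payload : String) (out : String) : Prop := out = tamper8_alt payload
instance (payload : String) (out : String) : Decidable (Spec_tamper8 payload out) := by unfold Spec_tamper8; infer_instance

-- ===== CLAIM (what is proved, stated in full; the proofs are below) =====
def Claim_equal_tamper8 : Prop := ∀ (payload : String), Dom_tamper8 payload → Spec_tamper8 payload (tamper8 payload)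

-- ===== LEMMAS AND PROOFS =====

-- B's value on a parts list (head encoded plainly, later parts via pvHandlePart)
def pvBCore : List (List Char) → List Char
  | [] => []
  | p0 :: ps => pvEncodeAll p0 ++ (ps.map pvHandlePart).flatten

theorem pvEnc_percent : pvEnc '%' = ['%', 'u', '0', '0', '2', '5'] := by decide

theorem pvIsHex_percent : pvIsHex '%' = false := by decide

-- '%u00' ++ [a, b]
def pvPres (a b : Char) : List Char := '%' :: 'u' :: '0' :: '0' :: [a, b]

theorem pvSplitOn_ne_nil (l : List Char) : l.splitOn '%' ≠ [] :=
  List.splitOnP_ne_nil _ _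

theorem pvSplitOn_percent_cons (t : List Char) :
    ('%' :: t).splitOn '%' = [] :: t.splitOn '%' := by
  simp [List.splitOn, List.splitOnP_cons]

theorem pvSplitOn_ne_cons (c : Char) (t : List Char) (hc : c ≠ '%') :
    (c :: t).splitOn '%' = List.modifyHead (List.cons c) (t.splitOn '%') := by
  simp [List.splitOn, List.splitOnP_cons, hc]

theorem pvSplitOn_nonhex_head (t : List Char)
    (h : ∀ a b r, t = a :: b :: r → (pvIsHex a && pvIsHex b) = false) :
    pvBCore (('%' :: t).splitOn '%') = pvEnc '%' ++ pvBCore (t.splitOn '%') := by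
  rw [pvSplitOn_percent_cons]
  cases hs : t.splitOn '%' with
  | nil => exact absurd hs (pvSplitOn_ne_nil t)
  | cons p0 ps =>
    have hhandle : pvHandlePart p0 = pvEnc '%' ++ pvEncodeAll p0 := by
      match t, p0, hs, h with
      | [], p0, hs, h =>
        simp [List.splitOn, List.splitOnP_nil] at hs
        simp [hs.1, pvHandlePart, pvEncodeAll, pvEnc_percent]
      | '%' :: t', p0, hs, h =>
        rw [pvSplitOn_percent_cons] at hs
        cases hs; simp [pvHandlePart, pvEncodeAll, pvEnc_percent]
      | c :: t', p0, hs, h =>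
        by_cases hc : c = '%'
        · subst hc
          rw [pvSplitOn_percent_cons] at hs
          cases hs; simp [pvHandlePart, pvEncodeAll, pvEnc_percent]
        · rw [pvSplitOn_ne_cons c t' hc] at hs
          cases hq : t'.splitOn '%' with
          | nil => exact absurd hq (pvSplitOn_ne_nil t')
          | cons q0 qs =>
            rw [hq] at hs
            simp only [List.modifyHead, List.cons.injEq] at hs
            obtain ⟨hp0, -⟩ := hs
            subst hp0
            match t', q0, hq, h with
            | [], q0, hq, h =>
              simp [List.splitOn, List.splitOnP_nil] at hq
              simp [hq.1, pvHandlePart, pvEnc_percent, pvEncodeAll]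
            | '%' :: t'', q0, hq, h =>
              rw [pvSplitOn_percent_cons] at hq
              cases hq; simp [pvHandlePart, pvEnc_percent, pvEncodeAll]
            | d :: t'', q0, hq, h =>
              by_cases hd : d = '%'
              · subst hd
                rw [pvSplitOn_percent_cons] at hq
                cases hq; simp [pvHandlePart, pvEnc_percent, pvEncodeAll]
              · rw [pvSplitOn_ne_cons d t'' hd] at hq
                cases hr : t''.splitOn '%' with
                | nil => exact absurd hr (pvSplitOn_ne_nil t'')
                | cons r0 rs =>
                  rw [hr] at hq
                  simp only [List.modifyHead, List.cons.injEq] at hq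
                  obtain ⟨hq0, -⟩ := hq
                  subst hq0
                  simp [pvHandlePart, h c d t'' rfl, pvEnc_percent]
    simp [pvBCore, hhandle, pvEncodeAll]

theorem pvSplitOn_hex_head (a b : Char) (r : List Char)
    (ha : pvIsHex a = true) (hb : pvIsHex b = true) :
    pvBCore (('%' :: a :: b :: r).splitOn '%') = pvPres a b ++ pvBCore (r.splitOn '%') := by
  have hne : ∀ c : Char, pvIsHex c = true → c ≠ '%' := fun c h hc => by
    subst hc; rw [pvIsHex_percent] at h; cases h
  rw [pvSplitOn_percent_cons, pvSplitOn_ne_cons a _ (hne a ha), pvSplitOn_ne_cons b _ (hne b hb)]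
  cases hr : r.splitOn '%' with
  | nil => exact absurd hr (pvSplitOn_ne_nil r)
  | cons r0 rs =>
    simp [pvBCore, List.modifyHead, pvHandlePart, ha, hb, pvPres, pvEncodeAll]

theorem pvSplitOn_plain_head (c : Char) (t : List Char) (hc : c ≠ '%') :
    pvBCore ((c :: t).splitOn '%') = pvEnc c ++ pvBCore (t.splitOn '%') := by
  rw [pvSplitOn_ne_cons c t hc]
  cases hs : t.splitOn '%' with
  | nil => exact absurd hs (pvSplitOn_ne_nil t)
  | cons p0 ps => simp [pvBCore, List.modifyHead, pvEncodeAll]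

theorem tamper8Loop_eq (l acc : List Char) :
    tamper8Loop l acc = acc ++ pvBCore (l.splitOn '%') := by
  induction l, acc using tamper8Loop.induct with
  | case1 a b rest acc hhex ih =>
    obtain ⟨ha, hb⟩ := Bool.and_eq_true_iff.mp hhex
    rw [tamper8Loop, if_pos hhex, ih, pvSplitOn_hex_head a b rest ha hb]
    simp [pvPres]
  | case2 a b rest acc hhex ih =>
    rw [tamper8Loop, if_neg hhex, ih]
    rw [pvSplitOn_nonhex_head (a :: b :: rest)
      (fun x y r hxy => by cases hxy; simpa using hhex)]
    simp
  | case3 c rest acc hne ih =>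
    rw [tamper8Loop, ih]
    by_cases hc : c = '%'
    · subst hc
      rw [pvSplitOn_nonhex_head rest (fun a b r hr => (hne a b r rfl hr).elim)]
      simp
    · rw [pvSplitOn_plain_head c rest hc]
      simp
    · exact hne
  | case4 acc => simp [tamper8Loop, List.splitOn, List.splitOnP_nil, pvBCore, pvEncodeAll]

-- ===== VERDICT (by name: the statement is the Claim_ definition above) =====
theorem tamper8_spec : Claim_equal_tamper8 := by
  intro payload _
  unfold Spec_tamper8 tamper8 tamper8_alt
  by_cases h : payload = ""
  · simp [h]
  · simp only [if_neg h]
    rw [tamper8Loop_eq]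
    cases hs : payload.toList.splitOn '%' with
    | nil => exact absurd hs (pvSplitOn_ne_nil _)
    | cons p0 ps => simp [pvBCore]
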